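-- pv_equiv track=rewrite | github.com/passionzhan/LeetCode | minimumLengthEncoding.py | minimumLengthEncoding_sort
-- ===== SOURCE A (Python) =====
-- from typing import List
--
-- def minimumLengthEncoding_sort(words: List[str]) -> int:
--     n = len(words)
--     words.sort(key=lambda word:word[::-1])
--
--     S = ''
--     i = 0
--     while i < len(words):
--         while i < len(words)-1 and len(words[i]) <= len(words[i+1]) and words[i] == words[i+1][-len(words[i]):]:
--             i +=1
--         S += words[i]
--         S += '#'
--         i += 1
--
--     return len(S)
-- ===== SOURCE B (Python) =====
-- def minimumLengthEncoding_sort(words):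
--     # Hash-set of all words; drop every proper non-empty suffix of any word,
--     # then each surviving word contributes len(word)+1 ('word#').
--     # Note: unlike A, this does not mutate (sort) the input list; return value only.
--     good = set(words)
--     for w in words:
--         for k in range(1, len(w)):
--             good.discard(w[k:])
--     return sum(len(w) + 1 for w in good)
-- ===== Notes on version B (the rewrite author's own statement) =====
-- stated objective: faster
-- what changed: Replaces A's sort-by-reversed-word plus adjacent suffix-merge scan with a hash-set of the words from which every proper non-empty suffix of any word is discarded, then sums len+1 over the surviving words; no sorting and no chained string-slice comparisons.
import Mathlib
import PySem

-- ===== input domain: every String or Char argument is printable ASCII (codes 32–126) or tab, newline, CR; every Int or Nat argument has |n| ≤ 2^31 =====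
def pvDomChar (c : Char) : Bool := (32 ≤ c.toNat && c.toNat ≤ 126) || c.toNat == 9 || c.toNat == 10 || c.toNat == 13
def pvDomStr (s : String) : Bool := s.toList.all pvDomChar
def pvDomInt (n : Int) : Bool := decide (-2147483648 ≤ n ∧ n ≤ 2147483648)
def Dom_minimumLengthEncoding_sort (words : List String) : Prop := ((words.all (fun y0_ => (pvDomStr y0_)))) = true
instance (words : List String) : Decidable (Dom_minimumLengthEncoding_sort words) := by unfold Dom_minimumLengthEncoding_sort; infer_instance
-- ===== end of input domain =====

-- B replaces A's sort + adjacent-suffix-merge scan by a hash-set from which every proper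
-- non-empty suffix of any word is discarded, summing len+1 over the survivors.
-- A sorts its argument in place (words.sort); B does not mutate the list — the
-- equivalence proved here is about the return value only.


-- ===== PORT A =====
-- guard of A's inner while: i < len(words)-1 and len(words[i]) <= len(words[i+1])
-- and words[i] == words[i+1][-len(words[i]):]
def pvCondA (ws : List String) (i : Nat) : Bool :=
  decide (i < ws.length - 1) &&
    (decide (PySem.Str.len (ws.getD i "") ≤ PySem.Str.len (ws.getD (i + 1) "")) &&
      (ws.getD i "" == PySem.Str.slice (ws.getD (i + 1) "") (some (-(PySem.Str.len (ws.getD i "")))) none))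

-- A's inner while: advance i while the guard holds
def pvInnerA (ws : List String) (i : Nat) : Nat :=
  if pvCondA ws i then pvInnerA ws (i + 1) else i
termination_by ws.length - i
decreasing_by simp [pvCondA] at *; omega

-- termination helper for pvOuterA (cited in its decreasing_by)
theorem pvInnerA_ge (ws : List String) (i : Nat) : i ≤ pvInnerA ws i := by
  fun_induction pvInnerA ws i with
  | case1 i hc ih => omega
  | case2 i hc => omega

-- A's outer while: S += words[i]; S += '#'; i += 1   (S kept as its character list)
def pvOuterA (ws : List String) (i : Nat) (S : List Char) : List Char :=
  if h : i < ws.length then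
    let j := pvInnerA ws i
    pvOuterA ws (j + 1) (S ++ (ws.getD j "").toList ++ ['#'])
  else S
termination_by ws.length - i
decreasing_by have := pvInnerA_ge ws i; omega

def minimumLengthEncoding_sort (words : List String) : Int :=
  let ws := PySem.List.sorted words (fun word => (PySem.Str.slice? word none none (-1)).getD "")
  ((pvOuterA ws 0 []).length : Int)

-- ===== PORT B =====
def minimumLengthEncoding_sort_alt (words : List String) : Int :=
  let good := words.foldl
    (fun s w => (PySem.List.pyRange 1 (PySem.Str.len w)).foldl
        (fun s k => PySem.Set.discard s (PySem.Str.slice w (some k) none)) s)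
    (PySem.Set.ofList words)
  (good.map (fun w => PySem.Str.len w + 1)).sum

-- ===== PRECONDITION & SPEC =====
def Spec_minimumLengthEncoding_sort (words : List String) (out : Int) : Prop := out = minimumLengthEncoding_sort_alt words
instance (words : List String) (out : Int) : Decidable (Spec_minimumLengthEncoding_sort words out) := by unfold Spec_minimumLengthEncoding_sort; infer_instance

-- ===== CLAIM (what is proved, stated in full; the proofs are below) =====
def Claim_equal_minimumLengthEncoding_sort : Prop := ∀ (words : List String), Dom_minimumLengthEncoding_sort words → Spec_minimumLengthEncoding_sort words (minimumLengthEncoding_sort words)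

-- ===== LEMMAS AND PROOFS =====

-- "u would be merged by A's scan into a directly following v": u is a suffix of v,
-- except that the empty word only merges into the empty word (words[i+1][-0:] is all of words[i+1])
def pvSfx (u v : String) : Bool :=
  u.toList.reverse.isPrefixOf v.toList.reverse && (!u.toList.reverse.isEmpty || v.toList.reverse.isEmpty)

-- "u is a proper non-empty suffix of w" — exactly what B discards
def pvPNS (u w : String) : Bool :=
  !u.toList.isEmpty && (u.toList.isSuffixOf w.toList && decide (u.toList.length < w.toList.length))

-- the common value: sum of len+1 over entries not merged into a later entry
def pvF : List String → Int
  | [] => 0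
  | x :: t => (if ∀ v ∈ t, pvSfx x v = false then (x.toList.length : Int) + 1 else 0) + pvF t

theorem pvSfx_iff (u v : String) : pvSfx u v = true ↔ (u.toList <:+ v.toList ∧ (u.toList = [] → v.toList = [])) := by
  simp [pvSfx, List.isPrefixOf_iff_prefix, List.reverse_prefix]
  tauto
theorem pvPNS_iff (u w : String) : pvPNS u w = true ↔ (u.toList ≠ [] ∧ u.toList <:+ w.toList ∧ u.toList.length < w.toList.length) := by
  simp [pvPNS, List.isSuffixOf_iff_suffix]
theorem pvSfx_iff' (u v : String) : pvSfx u v = true ↔ (v = u ∨ pvPNS u v = true) := by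
  rw [pvSfx_iff, pvPNS_iff]
  constructor
  · rintro ⟨hs, he⟩
    by_cases huv : v = u
    · exact Or.inl huv
    · refine Or.inr ⟨?_, hs, lt_of_le_of_ne hs.length_le ?_⟩
      · intro h0
        exact huv (String.toList_inj.mp (by rw [he h0, h0]))
      · intro hlen
        exact huv (String.toList_inj.mp (hs.eq_of_length hlen)).symm
  · rintro (rfl | ⟨h0, hs, hl⟩)
    · exact ⟨List.suffix_refl _, fun h => h⟩
    · exact ⟨hs, fun h => absurd h h0⟩
theorem pvCondA_iff (ws : List String) (i : Nat) (h : i + 1 < ws.length) :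
    pvCondA ws i = true ↔ pvSfx (ws.getD i "") (ws.getD (i + 1) "") = true := by
  set u := ws.getD i "" with hu
  set v := ws.getD (i + 1) "" with hv
  have hb : decide (i < ws.length - 1) = true := by simp; omega
  rw [pvCondA, hb, Bool.true_and, pvSfx_iff]
  simp only [Bool.and_eq_true, decide_eq_true_eq, beq_iff_eq, PySem.Str.len_eq]
  have hslice : (PySem.Str.slice v (some (-(↑u.toList.length : Int))) none).toList
      = if u.toList.length = 0 then v.toList else v.toList.drop (v.toList.length - u.toList.length) := by
    rw [PySem.Str.toList_slice, PySem.Chars.slice_eq_listSlice]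
    rcases Nat.eq_zero_or_pos u.toList.length with hz | hz
    · rw [hz, if_pos rfl]
      simp [PySem.List.slice_zero_start, PySem.List.slice_none_none]
    · rw [if_neg (by omega)]
      exact PySem.List.slice_from_neg_natCast _ _ hz
  constructor
  · rintro ⟨hle, he⟩
    have he' : u.toList = (PySem.Str.slice v (some (-(↑u.toList.length : Int))) none).toList :=
      congrArg _ he
    rw [hslice] at he'
    by_cases hz : u.toList.length = 0
    · rw [if_pos hz] at he'
      have h0 : u.toList = [] := List.length_eq_zero_iff.mp hz
      rw [h0] at he'
      rw [h0, ← he']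
      exact ⟨List.suffix_refl _, fun _ => rfl⟩
    · rw [if_neg hz] at he'
      refine ⟨List.suffix_iff_eq_drop.mpr he', fun h0 => absurd (congrArg List.length h0) (by simpa using hz)⟩
  · rintro ⟨hs, h0⟩
    have hle := hs.length_le
    refine ⟨by exact_mod_cast hle, String.toList_inj.mp ?_⟩
    rw [hslice]
    by_cases hz : u.toList.length = 0
    · rw [if_pos hz]
      rw [List.length_eq_zero_iff.mp hz, h0 (List.length_eq_zero_iff.mp hz)]
    · rw [if_neg hz]
      exact List.suffix_iff_eq_drop.mp hs
theorem pv_prefix_lt (p v : List Char) (h : p <+: v) (hne : p ≠ v) : p < v := by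
  induction p generalizing v with
  | nil =>
    cases v with
    | nil => exact absurd rfl hne
    | cons b v' => exact List.nil_lt_cons b v'
  | cons a p' ih =>
    cases v with
    | nil => simp at h
    | cons b v' =>
      rcases List.cons_prefix_cons.mp h with ⟨rfl, hp⟩
      exact List.cons_lt_cons_iff.mpr (Or.inr ⟨rfl, ih v' hp (fun e => hne (by rw [e]))⟩)
theorem pv_between (p y z : List Char) (h : p <+: z) (h1 : ¬ y < p) (h2 : ¬ z < y) : p <+: y := by
  induction p generalizing y z with
  | nil => exact List.nil_prefix
  | cons a p' ih =>
    cases y with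
    | nil => exact absurd (List.nil_lt_cons a p') h1
    | cons b y' =>
      cases z with
      | nil => simp at h
      | cons c z' =>
        rcases List.cons_prefix_cons.mp h with ⟨rfl, hp⟩
        rcases lt_trichotomy a b with hab | rfl | hba
        · exact absurd (List.cons_lt_cons_iff.mpr (Or.inl hab)) h2
        · refine List.cons_prefix_cons.mpr ⟨rfl, ih y' z' hp ?_ ?_⟩
          · intro hl; exact h1 (List.cons_lt_cons_iff.mpr (Or.inr ⟨rfl, hl⟩))
          · intro hl; exact h2 (List.cons_lt_cons_iff.mpr (Or.inr ⟨rfl, hl⟩))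
        · exact absurd (List.cons_lt_cons_iff.mpr (Or.inl hba)) h1
theorem pvSfx_between (u w v : String) (h : pvSfx u v = true)
    (h1 : ¬ w.toList.reverse < u.toList.reverse) (h2 : ¬ v.toList.reverse < w.toList.reverse) :
    pvSfx u w = true := by
  rw [pvSfx_iff] at h ⊢
  rcases h with ⟨hs, h0⟩
  refine ⟨List.reverse_prefix.mp ?_, fun hu => ?_⟩
  · exact pv_between _ _ _ (List.reverse_prefix.mpr hs) h1 h2
  · rw [h0 hu, List.reverse_nil] at h2
    rcases hw : w.toList.reverse with _ | ⟨c, r⟩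
    · simpa using congrArg List.reverse hw
    · exact absurd (hw ▸ List.nil_lt_cons c r) h2
theorem pvInnerA_lt (ws : List String) (i : Nat) (h : i < ws.length) : pvInnerA ws i < ws.length := by
  fun_induction pvInnerA ws i with
  | case1 i hc ih => exact ih (by simp [pvCondA] at hc; omega)
  | case2 i hc => omega
theorem pvInnerA_false (ws : List String) (i : Nat) : pvCondA ws (pvInnerA ws i) = false := by
  fun_induction pvInnerA ws i with
  | case1 i hc ih => exact ih
  | case2 i hc => simpa using hc
theorem pvF_skip (ws : List String) (i : Nat) (h : pvCondA ws i = true) :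
    pvF (ws.drop i) = pvF (ws.drop (i + 1)) := by
  have hb : i + 1 < ws.length := by simp [pvCondA] at h; omega
  rw [List.drop_eq_getElem_cons (by omega), pvF]
  rw [if_neg]
  · simp
  · intro hall
    have hmem : ws[i + 1] ∈ ws.drop (i + 1) := by
      rw [List.drop_eq_getElem_cons hb]; exact List.mem_cons_self
    have hsfx := (pvCondA_iff ws i hb).mp h
    rw [List.getD_eq_getElem ws "" (by omega), List.getD_eq_getElem ws "" hb] at hsfx
    exact absurd hsfx (by rw [hall ws[i + 1] hmem]; simp)
theorem pvF_inner (ws : List String) (i : Nat) :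
    pvF (ws.drop i) = pvF (ws.drop (pvInnerA ws i)) := by
  fun_induction pvInnerA ws i with
  | case1 i hc ih => rw [pvF_skip ws i hc, ih]
  | case2 i hc => rfl
theorem pvF_keep (ws : List String) (hp : ws.Pairwise (fun a b => ¬ b.toList.reverse < a.toList.reverse))
    (j : Nat) (hj : j < ws.length) (hc : pvCondA ws j = false) :
    pvF (ws.drop j) = ((ws.getD j "").toList.length + 1 : Int) + pvF (ws.drop (j + 1)) := by
  rw [List.drop_eq_getElem_cons hj, pvF, List.getD_eq_getElem ws "" hj]
  rcases Nat.lt_or_ge (j + 1) ws.length with hb | hb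
  · rw [if_pos]
    intro v hv
    by_contra hvt
    rw [Bool.not_eq_false] at hvt
    -- v ∈ drop (j+1) = ws[j+1] :: drop (j+2)
    rw [List.drop_eq_getElem_cons hb] at hv
    have hpd : (ws.drop j).Pairwise (fun a b => ¬ b.toList.reverse < a.toList.reverse) :=
      hp.sublist (List.drop_sublist j ws)
    rw [List.drop_eq_getElem_cons hj] at hpd
    have hpd' := hpd
    rw [List.pairwise_cons] at hpd
    have h1 : ¬ ws[j + 1].toList.reverse < ws[j].toList.reverse := by
      apply hpd.1
      rw [List.drop_eq_getElem_cons hb]; exact List.mem_cons_self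
    have hsfx1 : pvSfx ws[j] ws[j + 1] = true := by
      rcases List.mem_cons.mp hv with rfl | hv'
      · exact hvt
      · have hpd2 := hpd.2
        rw [List.drop_eq_getElem_cons hb, List.pairwise_cons] at hpd2
        exact pvSfx_between _ _ _ hvt h1 (hpd2.1 v hv')
    have := (pvCondA_iff ws j hb).mpr
      (by rw [List.getD_eq_getElem ws "" hj, List.getD_eq_getElem ws "" hb]; exact hsfx1)
    rw [hc] at this; exact absurd this (by simp)
  · rw [List.drop_eq_nil_of_le hb]
    simp [pvF]
theorem pvOuterA_len (ws : List String)
    (hp : ws.Pairwise (fun a b => ¬ b.toList.reverse < a.toList.reverse))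
    (i : Nat) (S : List Char) :
    ((pvOuterA ws i S).length : Int) = (S.length : Int) + pvF (ws.drop i) := by
  fun_induction pvOuterA ws i S with
  | case1 i S h j ih =>
    rw [ih, pvF_inner ws i, pvF_keep ws hp j (pvInnerA_lt ws i h) (pvInnerA_false ws i)]
    simp
    ring
  | case2 i S h =>
    rw [List.drop_eq_nil_of_le (by omega), pvF]
    simp
theorem pvPNS_self (x : String) : pvPNS x x = false := by
  rw [Bool.eq_false_iff]
  intro h
  rcases (pvPNS_iff x x).mp h with ⟨-, -, hl⟩
  omega
theorem pvF_eq_sum (l : List String)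
    (hp : l.Pairwise (fun a b => ¬ b.toList.reverse < a.toList.reverse)) :
    pvF l = ((PySem.Set.ofList l).map
      (fun u => if ∀ w ∈ l, pvPNS u w = false then (u.toList.length : Int) + 1 else 0)).sum := by
  induction l with
  | nil => simp [pvF, PySem.Set.ofList]
  | cons x t ih =>
    rw [List.pairwise_cons] at hp
    have hnx : ∀ u ∈ t, pvPNS u x = false := by
      intro u hu
      by_contra hux
      rw [Bool.not_eq_false] at hux
      rcases (pvPNS_iff u x).mp hux with ⟨h0, hs, hl⟩
      refine hp.1 u hu (pv_prefix_lt _ _ (List.reverse_prefix.mpr hs) (fun e => ?_))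
      have := congrArg List.length e
      rw [List.length_reverse, List.length_reverse] at this
      omega
    have hcong : ∀ u ∈ PySem.Set.ofList t,
        (if ∀ w ∈ x :: t, pvPNS u w = false then (u.toList.length : Int) + 1 else 0)
          = (if ∀ w ∈ t, pvPNS u w = false then (u.toList.length : Int) + 1 else 0) := by
      intro u hu
      rw [PySem.Set.mem_ofList] at hu
      congr 1
      simp only [List.mem_cons, eq_iff_iff]
      constructor
      · intro ha w hw; exact ha w (Or.inr hw)
      · rintro ha w (rfl | hw')
        · exact hnx u hu
        · exact ha w hw'
    have hxcond : (∀ w ∈ x :: t, pvPNS x w = false) ↔ (∀ v ∈ t, pvPNS x v = false) := by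
      simp only [List.mem_cons]
      constructor
      · intro ha w hw; exact ha w (Or.inr hw)
      · rintro ha w (rfl | hw')
        · exact pvPNS_self _
        · exact ha w hw'
    by_cases hxt : x ∈ t
    · have hperm : (PySem.Set.ofList (x :: t)).Perm (PySem.Set.ofList t) :=
        (List.perm_ext_iff_of_nodup (PySem.Set.nodup_ofList _) (PySem.Set.nodup_ofList _)).mpr
          (by intro a; simp only [PySem.Set.mem_ofList, List.mem_cons]
              exact ⟨fun h => h.elim (fun e => e ▸ hxt) id, Or.inr⟩)
      rw [pvF, if_neg, ((hperm.map _).sum_eq :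
        ((PySem.Set.ofList (x :: t)).map _).sum = ((PySem.Set.ofList t).map _).sum)]
      · rw [List.map_congr_left hcong, zero_add]
        exact ih hp.2
      · intro hall
        have := hall x hxt
        rw [(pvSfx_iff' x x).mpr (Or.inl rfl)] at this
        simp at this
    · have hperm : (PySem.Set.ofList (x :: t)).Perm (x :: PySem.Set.ofList t) :=
        (List.perm_ext_iff_of_nodup (PySem.Set.nodup_ofList _)
            (by simp [List.nodup_cons, PySem.Set.nodup_ofList, PySem.Set.mem_ofList, hxt])).mpr
          (by intro a; simp [PySem.Set.mem_ofList])
      rw [pvF, ((hperm.map _).sum_eq :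
        ((PySem.Set.ofList (x :: t)).map _).sum = ((x :: PySem.Set.ofList t).map _).sum)]
      rw [List.map_cons, List.sum_cons, List.map_congr_left hcong]
      have hhead : (∀ v ∈ t, pvSfx x v = false) ↔ (∀ w ∈ x :: t, pvPNS x w = false) := by
        rw [hxcond]
        constructor
        · intro ha v hv
          have := ha v hv
          rw [Bool.eq_false_iff] at this ⊢
          exact fun hpns => this ((pvSfx_iff' x v).mpr (Or.inr hpns))
        · intro ha v hv
          rw [Bool.eq_false_iff]
          intro hsfx
          rcases (pvSfx_iff' x v).mp hsfx with rfl | hpns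
          · exact hxt hv
          · exact absurd hpns (by rw [ha v hv]; simp)
      rw [ih hp.2]
      congr 1
      rw [if_congr hhead rfl rfl]
theorem pv_foldl_discard {β : Type} (ks : List β) (f : β → String) (s : List String) :
    ks.foldl (fun s k => PySem.Set.discard s (f k)) s
      = s.filter (fun u => ks.all (fun k => !(u == f k))) := by
  induction ks generalizing s with
  | nil => simp
  | cons k ks ih =>
    rw [List.foldl_cons, ih]
    show (PySem.Set.discard s (f k)).filter _ = _
    rw [PySem.Set.discard, List.filter_filter]
    congr 1
    funext u
    simp [Bool.and_comm]
theorem pv_foldl_filter (ys : List String) (g : String → String → Bool) (s : List String) :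
    ys.foldl (fun s w => s.filter (g w)) s = s.filter (fun u => ys.all (fun w => g w u)) := by
  induction ys generalizing s with
  | nil => simp
  | cons y ys ih =>
    rw [List.foldl_cons, ih, List.filter_filter]
    congr 1
    funext u
    simp [Bool.and_comm]
theorem pv_all_slice (u w : String) :
    ((PySem.List.pyRange 1 (PySem.Str.len w)).all
      (fun k => !(u == PySem.Str.slice w (some k) none))) = !pvPNS u w := by
  rw [Bool.eq_iff_iff]
  simp only [List.all_eq_true, PySem.List.mem_pyRange_one, Bool.not_eq_true', beq_eq_false_iff_ne,
    ne_eq]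
  constructor
  · intro hall
    rw [Bool.eq_false_iff]
    intro hpns
    rcases (pvPNS_iff u w).mp hpns with ⟨h0, hs, hl⟩
    have h0l : 0 < u.toList.length := List.length_pos_iff.mpr h0
    refine hall ((w.toList.length : Int) - u.toList.length) ⟨by omega, by rw [PySem.Str.len_eq]; omega⟩ ?_
    apply String.toList_inj.mp
    rw [PySem.Str.toList_slice, PySem.Chars.slice_eq_listSlice,
      PySem.List.slice_from _ (by omega : (0:Int) ≤ (w.toList.length : Int) - u.toList.length)]
    have : ((w.toList.length : Int) - u.toList.length).toNat = w.toList.length - u.toList.length := by omega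
    rw [this]
    exact List.suffix_iff_eq_drop.mp hs
  · intro hpns k ⟨hk1, hk2⟩ he
    rw [PySem.Str.len_eq] at hk2
    have hke : (PySem.Str.slice w (some k) none).toList = w.toList.drop k.toNat := by
      rw [PySem.Str.toList_slice, PySem.Chars.slice_eq_listSlice, PySem.List.slice_from _ (by omega)]
    have hu : u.toList = w.toList.drop k.toNat := by rw [he, hke]
    have hlen : u.toList.length = w.toList.length - k.toNat := by rw [hu, List.length_drop]
    have : pvPNS u w = true := by
      rw [pvPNS_iff]
      refine ⟨?_, hu ▸ List.drop_suffix _ _, by omega⟩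
      rw [← List.length_pos_iff]
      omega
    rw [hpns] at this
    simp at this
theorem pv_sum_filter (l : List String) (p : String → Bool) (f : String → Int) :
    ((l.filter p).map f).sum = (l.map (fun u => if p u then f u else 0)).sum := by
  induction l with
  | nil => rfl
  | cons x t ih => by_cases h : p x <;> simp [h, ih]
theorem pvB_char (words : List String) :
    minimumLengthEncoding_sort_alt words = ((PySem.Set.ofList words).map
      (fun u => if ∀ w ∈ words, pvPNS u w = false then (u.toList.length : Int) + 1 else 0)).sum := by
  rw [minimumLengthEncoding_sort_alt]
  simp only [pv_foldl_discard, pv_foldl_filter, pv_all_slice]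
  rw [pv_sum_filter]
  refine congrArg List.sum (List.map_congr_left ?_)
  intro u hu
  have : (words.all (fun w => !pvPNS u w) = true) ↔ (∀ w ∈ words, pvPNS u w = false) := by
    simp [List.all_eq_true]
  rw [PySem.Str.len_eq]
  exact if_congr this rfl rfl

theorem pv_final (words : List String) :
    minimumLengthEncoding_sort words = minimumLengthEncoding_sort_alt words := by
  have hkey : (fun word => (PySem.Str.slice? word none none (-1)).getD "")
      = (fun w : String => String.ofList w.toList.reverse) := by
    funext w
    rw [PySem.Str.slice?_none_none_neg_one]
    rfl
  rw [minimumLengthEncoding_sort, hkey]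
  set key := fun w : String => String.ofList w.toList.reverse with hk
  set ws := PySem.List.sorted words key with hws
  have hp : ws.Pairwise (fun a b => ¬ b.toList.reverse < a.toList.reverse) := by
    refine (PySem.List.sorted_pairwise words key).imp ?_
    intro a b hle hlt
    have hlt' : key b < key a := by
      rw [String.lt_iff_toList_lt]
      simpa [key] using hlt
    exact absurd hle (not_le.mpr hlt')
  have hlen := pvOuterA_len ws hp 0 []
  simp only [List.drop_zero, List.length_nil, Nat.cast_zero, zero_add] at hlen
  rw [hlen, pvF_eq_sum ws hp, pvB_char]
  have hperm : ws.Perm words := PySem.List.sorted_perm words key false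
  have hcond : ∀ u, (∀ w ∈ ws, pvPNS u w = false) ↔ (∀ w ∈ words, pvPNS u w = false) := by
    intro u
    constructor <;> intro h w hw
    · exact h w (hperm.mem_iff.mpr hw)
    · exact h w (hperm.mem_iff.mp hw)
  have hsp : (PySem.Set.ofList ws).Perm (PySem.Set.ofList words) :=
    (List.perm_ext_iff_of_nodup (PySem.Set.nodup_ofList _) (PySem.Set.nodup_ofList _)).mpr
      (fun a => by rw [PySem.Set.mem_ofList, PySem.Set.mem_ofList]; exact hperm.mem_iff)
  rw [List.map_congr_left (fun u _ => if_congr (hcond u) rfl rfl)]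
  exact (hsp.map _).sum_eq

-- ===== VERDICT (by name: the statement is the Claim_ definition above) =====
theorem minimumLengthEncoding_sort_spec : Claim_equal_minimumLengthEncoding_sort := by
  intro words _
  exact pv_final words
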